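-- pv_equiv track=rewrite | github.com/dcuturic/ki_baddie | fbx_to_vrm/converter.py | auto_map_expressions
-- ===== SOURCE A (Python) =====
-- EXPRESSION_PATTERNS = {
--     "happy": ["happy", "smile", "joy", "lachen", "freude", "froh", "grinsen"],
--     "angry": ["angry", "anger", "wut", "mad"],
--     "sad": ["sad", "sadness", "trauer", "traurig", "cry", "weinen"],
--     "relaxed": ["relaxed", "relax", "calm"],
--     "surprised": ["surprised", "surprise", "shock", "wow"],
--     "aa": ["aa", "a", "mouth_a", "vrc.v_aa", "mth_a"],
--     "ih": ["ih", "i", "mouth_i", "vrc.v_ih", "mth_i"],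
--     "ou": ["ou", "u", "mouth_u", "vrc.v_ou", "mth_u"],
--     "ee": ["ee", "e", "mouth_e", "vrc.v_ee", "mth_e"],
--     "oh": ["oh", "o", "mouth_o", "vrc.v_oh", "mth_o"],
--     "blink": ["blink", "close_eyes", "eye_close"],
--     "blinkLeft": ["blink_l", "blink.l", "wink_l", "left_blink", "blink_left"],
--     "blinkRight": ["blink_r", "blink.r", "wink_r", "right_blink", "blink_right"],
--     "lookUp": ["look_up", "lookup", "eye_up"],
--     "lookDown": ["look_down", "lookdown", "eye_down"],
--     "lookLeft": ["look_left", "lookleft", "eye_left"],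
--     "lookRight": ["look_right", "lookright", "eye_right"],
--     "neutral": ["neutral", "default", "basis", "normal"],
-- }
--
-- def auto_map_expressions(shape_keys: dict) -> dict:
--     """Shape Keys automatisch zu VRM Expressions mappen."""
--     all_keys = []
--     for mesh_name, keys in shape_keys.items():
--         for key in keys:
--             all_keys.append((mesh_name, key))
--
--     mapping = {}
--     for expr_name, patterns in EXPRESSION_PATTERNS.items():
--         for mesh_name, key_name in all_keys:
--             clean = key_name.lower().strip()
--             for pat in patterns:
--                 if clean == pat.lower() or pat.lower() in clean:
--                     if expr_name not in mapping:
--                         mapping[expr_name] = []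
--                     mapping[expr_name].append((mesh_name, key_name))
--                     break
--     return mapping
-- ===== SOURCE B (Python) =====
-- EXPRESSION_PATTERNS = {
--     "happy": ["happy", "smile", "joy", "lachen", "freude", "froh", "grinsen"],
--     "angry": ["angry", "anger", "wut", "mad"],
--     "sad": ["sad", "sadness", "trauer", "traurig", "cry", "weinen"],
--     "relaxed": ["relaxed", "relax", "calm"],
--     "surprised": ["surprised", "surprise", "shock", "wow"],
--     "aa": ["aa", "a", "mouth_a", "vrc.v_aa", "mth_a"],
--     "ih": ["ih", "i", "mouth_i", "vrc.v_ih", "mth_i"],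
--     "ou": ["ou", "u", "mouth_u", "vrc.v_ou", "mth_u"],
--     "ee": ["ee", "e", "mouth_e", "vrc.v_ee", "mth_e"],
--     "oh": ["oh", "o", "mouth_o", "vrc.v_oh", "mth_o"],
--     "blink": ["blink", "close_eyes", "eye_close"],
--     "blinkLeft": ["blink_l", "blink.l", "wink_l", "left_blink", "blink_left"],
--     "blinkRight": ["blink_r", "blink.r", "wink_r", "right_blink", "blink_right"],
--     "lookUp": ["look_up", "lookup", "eye_up"],
--     "lookDown": ["look_down", "lookdown", "eye_down"],
--     "lookLeft": ["look_left", "lookleft", "eye_left"],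
--     "lookRight": ["look_right", "lookright", "eye_right"],
--     "neutral": ["neutral", "default", "basis", "normal"],
-- }
--
-- # Inverted index built once: pattern text -> expression names.  All table
-- # patterns are lowercase and non-empty, so A's test `clean == p.lower() or
-- # p.lower() in clean` is exactly "p occurs as a substring of clean".
-- _PAT2EXPRS = {}
-- for _e, _ps in EXPRESSION_PATTERNS.items():
--     for _p in _ps:
--         _PAT2EXPRS.setdefault(_p, []).append(_e)
--
--
-- def auto_map_expressions(shape_keys: dict) -> dict:
--     """Shape Keys automatisch zu VRM Expressions mappen (inverted index:
--     every substring of each cleaned key is looked up in a pattern dict)."""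
--     hits = {e: [] for e in EXPRESSION_PATTERNS}
--     for mesh_name, keys in shape_keys.items():
--         for key_name in keys:
--             clean = key_name.lower().strip()
--             n = len(clean)
--             matched = set()
--             for i in range(n):
--                 for j in range(i + 1, n + 1):
--                     matched.update(_PAT2EXPRS.get(clean[i:j], []))
--             for e in matched:
--                 hits[e].append((mesh_name, key_name))
--     return {e: v for e, v in hits.items() if v}
-- ===== Notes on version B (the rewrite author's own statement) =====
-- stated objective: faster
-- what changed: Replaced per-expression pattern scanning with an inverted index: a pattern->expressions dict is built once from the table, each cleaned key enumerates its substrings and looks them up in that dict to collect the matched expression set (valid because every table pattern is lowercase and non-empty, so A's equality-or-substring test is exactly substring occurrence), then results are emitted from a preinitialized table-order dict.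
import Mathlib
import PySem

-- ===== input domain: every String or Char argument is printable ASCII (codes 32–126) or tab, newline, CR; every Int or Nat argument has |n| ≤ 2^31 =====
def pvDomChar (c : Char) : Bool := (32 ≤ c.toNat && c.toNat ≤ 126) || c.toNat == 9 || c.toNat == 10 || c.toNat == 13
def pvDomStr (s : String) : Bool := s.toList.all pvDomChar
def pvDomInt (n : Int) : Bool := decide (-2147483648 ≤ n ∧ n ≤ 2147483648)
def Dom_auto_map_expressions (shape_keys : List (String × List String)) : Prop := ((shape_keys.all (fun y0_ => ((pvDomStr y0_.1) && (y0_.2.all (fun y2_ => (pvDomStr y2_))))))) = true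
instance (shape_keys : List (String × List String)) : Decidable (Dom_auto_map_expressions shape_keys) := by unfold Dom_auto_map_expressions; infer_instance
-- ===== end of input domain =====

-- B replaces A's per-expression pattern scanning by an inverted index (pattern -> expression
-- names, built once); each cleaned key looks up all of its substrings in that index; same value.

def EXPRESSION_PATTERNS : List (String × List String) := [
  ("happy", ["happy", "smile", "joy", "lachen", "freude", "froh", "grinsen"]),
  ("angry", ["angry", "anger", "wut", "mad"]),
  ("sad", ["sad", "sadness", "trauer", "traurig", "cry", "weinen"]),
  ("relaxed", ["relaxed", "relax", "calm"]),
  ("surprised", ["surprised", "surprise", "shock", "wow"]),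
  ("aa", ["aa", "a", "mouth_a", "vrc.v_aa", "mth_a"]),
  ("ih", ["ih", "i", "mouth_i", "vrc.v_ih", "mth_i"]),
  ("ou", ["ou", "u", "mouth_u", "vrc.v_ou", "mth_u"]),
  ("ee", ["ee", "e", "mouth_e", "vrc.v_ee", "mth_e"]),
  ("oh", ["oh", "o", "mouth_o", "vrc.v_oh", "mth_o"]),
  ("blink", ["blink", "close_eyes", "eye_close"]),
  ("blinkLeft", ["blink_l", "blink.l", "wink_l", "left_blink", "blink_left"]),
  ("blinkRight", ["blink_r", "blink.r", "wink_r", "right_blink", "blink_right"]),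
  ("lookUp", ["look_up", "lookup", "eye_up"]),
  ("lookDown", ["look_down", "lookdown", "eye_down"]),
  ("lookLeft", ["look_left", "lookleft", "eye_left"]),
  ("lookRight", ["look_right", "lookright", "eye_right"]),
  ("neutral", ["neutral", "default", "basis", "normal"])]

-- ===== PORT A =====
-- A's innermost 'for pat in patterns: … break': true iff some pattern matches, first-match order.
def pvMatchA (clean : String) : List String → Bool
  | [] => false
  | p :: rest =>
    if clean == PySem.Str.lower p || PySem.Str.isIn (PySem.Str.lower p) clean then true
    else pvMatchA clean rest

-- body of A's inner loop over all_keys (for one expression ep)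
def pvStepA (ep : String × List String) (mapping : PySem.Dict String (List (String × String)))
    (mk : String × String) : PySem.Dict String (List (String × String)) :=
  let clean := PySem.Str.strip (PySem.Str.lower mk.2)
  if pvMatchA clean ep.2 then
    let mapping := if mapping.contains ep.1 then mapping else mapping.insert ep.1 []
    mapping.modify ep.1 [] (fun v => v ++ [mk])
  else mapping

def auto_map_expressions (shape_keys : List (String × List String)) : List (String × List (String × String)) :=
  let all_keys : List (String × String) :=
    shape_keys.foldl (fun acc p => p.2.foldl (fun acc k => acc ++ [(p.1, k)]) acc) []
  let mapping :=
    EXPRESSION_PATTERNS.foldl (fun mapping ep => all_keys.foldl (pvStepA ep) mapping) PySem.Dict.empty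
  mapping.items

-- ===== PORT B =====
-- module-level build of _PAT2EXPRS; 'd.setdefault(p, []).append(e)' is d[p] = d.get(p, []) + [e],
-- i.e. exactly PySem.Dict.modify p [] (· ++ [e])
def PAT2EXPRS : PySem.Dict String (List String) :=
  EXPRESSION_PATTERNS.foldl (fun d ep =>
    ep.2.foldl (fun d p => d.modify p [] (fun v => v ++ [ep.1])) d) PySem.Dict.empty

-- the matched set of one cleaned key: every substring clean[i:j] looked up in the index
def pvMatchedB (clean : String) : PySem.Set String :=
  (PySem.List.pyRange 0 (PySem.Str.len clean) 1).foldl (fun m i =>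
    (PySem.List.pyRange (i + 1) (PySem.Str.len clean + 1) 1).foldl (fun m j =>
      m.update (PAT2EXPRS.getD (PySem.Str.slice clean (some i) (some j)) [])) m)
    PySem.Set.empty

-- 'for e in matched: hits[e].append((mesh, key))': each append touches a distinct key of hits,
-- so the result does not depend on the set's iteration order; 'hits[e].append(x)' is
-- hits[e] = hits[e] + [x], i.e. PySem.Dict.modify e [] (· ++ [x]) (e is always a key of hits)
def pvStepKey (h : PySem.Dict String (List (String × String))) (mesh key : String) :
    PySem.Dict String (List (String × String)) :=
  (pvMatchedB (PySem.Str.strip (PySem.Str.lower key))).foldl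
    (fun h e => h.modify e [] (fun v => v ++ [(mesh, key)])) h

def auto_map_expressions_alt (shape_keys : List (String × List String)) : List (String × List (String × String)) :=
  -- hits = {e: [] for e in EXPRESSION_PATTERNS}, then the key loop, then the nonempty filter
  ((shape_keys.foldl (fun h p => p.2.foldl (fun h k => pvStepKey h p.1 k) h)
      (EXPRESSION_PATTERNS.foldl (fun d ep => d.insert ep.1 []) PySem.Dict.empty)).items.filter
    (fun kv => !kv.2.isEmpty))

-- ===== PRECONDITION & SPEC =====
def Spec_auto_map_expressions (shape_keys : List (String × List String)) (out : List (String × List (String × String))) : Prop := out = auto_map_expressions_alt shape_keys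
instance (shape_keys : List (String × List String)) (out : List (String × List (String × String))) : Decidable (Spec_auto_map_expressions shape_keys out) := by unfold Spec_auto_map_expressions; infer_instance

-- ===== CLAIM (what is proved, stated in full; the proofs are below) =====
def Claim_equal_auto_map_expressions : Prop := ∀ (shape_keys : List (String × List String)), Dom_auto_map_expressions shape_keys → Spec_auto_map_expressions shape_keys (auto_map_expressions shape_keys)

-- ===== LEMMAS AND PROOFS =====

-- the (expression, shape-key) match predicate A's loops decide
def pvQ (ep : String × List String) (mk : String × String) : Bool :=
  ep.2.any (fun p =>
    PySem.Str.strip (PySem.Str.lower mk.2) == PySem.Str.lower p ||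
    PySem.Str.isIn (PySem.Str.lower p) (PySem.Str.strip (PySem.Str.lower mk.2)))

lemma pvMatchA_eq_any (clean : String) (pats : List String) :
    pvMatchA clean pats =
      pats.any (fun p => clean == PySem.Str.lower p || PySem.Str.isIn (PySem.Str.lower p) clean) := by
  induction pats with
  | nil => simp [pvMatchA]
  | cons p rest ih =>
    simp only [pvMatchA, List.any_cons, ih]
    by_cases h : (clean == PySem.Str.lower p || PySem.Str.isIn (PySem.Str.lower p) clean) = true <;>
      simp_all

-- ---- A side: one step ----
lemma stepA_getD_self (ep : String × List String) (d : PySem.Dict String (List (String × String)))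
    (mk : String × String) :
    (pvStepA ep d mk).getD ep.1 [] = d.getD ep.1 [] ++ (if pvQ ep mk then [mk] else []) := by
  simp only [pvStepA, pvQ, pvMatchA_eq_any]
  split_ifs with hq hc
  · simp [PySem.Dict.getD_modify_self]
  · have hc' : d.contains ep.1 = false := by simpa using hc
    rw [PySem.Dict.getD_modify_self, PySem.Dict.getD_insert_self,
      PySem.Dict.getD_of_not_contains d _ hc']
  · simp
lemma stepA_getD_ne (ep : String × List String) (d : PySem.Dict String (List (String × String)))
    (mk : String × String) (k : String) (h : k ≠ ep.1) :
    (pvStepA ep d mk).getD k [] = d.getD k [] := by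
  simp only [pvStepA]
  split_ifs with hm hc
  · simp [PySem.Dict.getD_modify, h]
  · simp [PySem.Dict.getD_modify, PySem.Dict.getD_insert, h]
  · rfl
lemma stepA_contains (ep : String × List String) (d : PySem.Dict String (List (String × String)))
    (mk : String × String) (k : String) :
    (pvStepA ep d mk).contains k = (d.contains k || (k == ep.1 && pvQ ep mk)) := by
  simp only [pvStepA, pvQ, pvMatchA_eq_any]
  split_ifs with hq hc
  · rw [PySem.Dict.contains_modify, hq]
    cases hk : (k == ep.1) <;> cases hd : d.contains k <;> simp_all
  · rw [PySem.Dict.contains_modify, PySem.Dict.contains_insert, hq]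
    cases hk : (k == ep.1) <;> cases hd : d.contains k <;> simp
  · have hq' : (ep.2.any fun p =>
        PySem.Str.strip (PySem.Str.lower mk.2) == PySem.Str.lower p ||
        PySem.Str.isIn (PySem.Str.lower p) (PySem.Str.strip (PySem.Str.lower mk.2))) = false := by
      simpa using hq
    rw [hq']
    simp
lemma stepA_keys (ep : String × List String) (d : PySem.Dict String (List (String × String)))
    (mk : String × String) :
    (pvStepA ep d mk).keys =
      d.keys ++ (if d.contains ep.1 = false ∧ pvQ ep mk = true then [ep.1] else []) := by
  simp only [pvStepA, pvQ, pvMatchA_eq_any]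
  by_cases hq : (ep.2.any fun p =>
      PySem.Str.strip (PySem.Str.lower mk.2) == PySem.Str.lower p ||
      PySem.Str.isIn (PySem.Str.lower p) (PySem.Str.strip (PySem.Str.lower mk.2))) = true
  · rw [if_pos hq]
    by_cases hc : d.contains ep.1 = true
    · rw [if_pos hc, if_neg (by simp [hc]), PySem.Dict.keys_modify,
        PySem.Dict.keys_insert_of_contains _ _ hc, List.append_nil]
    · have hc' : d.contains ep.1 = false := by simpa using hc
      rw [if_neg hc, if_pos ⟨hc', hq⟩, PySem.Dict.keys_modify,
        PySem.Dict.keys_insert_of_contains _ _ (PySem.Dict.contains_insert_self d ep.1 []),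
        PySem.Dict.keys_insert_of_not_contains _ _ hc']
  · rw [if_neg hq, if_neg (fun h => hq h.2), List.append_nil]
lemma foldA_getD_self (ep : String × List String) :
    ∀ (all : List (String × String)) (d : PySem.Dict String (List (String × String))),
      (all.foldl (pvStepA ep) d).getD ep.1 [] = d.getD ep.1 [] ++ all.filter (pvQ ep) := by
  intro all
  induction all with
  | nil => intro d; simp
  | cons mk rest ih =>
    intro d
    simp only [List.foldl_cons, ih, stepA_getD_self, List.filter_cons]
    by_cases hq : pvQ ep mk = true <;> simp [hq]

lemma foldA_getD_ne (ep : String × List String) (k : String) (h : k ≠ ep.1) :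
    ∀ (all : List (String × String)) (d : PySem.Dict String (List (String × String))),
      (all.foldl (pvStepA ep) d).getD k [] = d.getD k [] := by
  intro all
  induction all with
  | nil => intro d; rfl
  | cons mk rest ih => intro d; simp only [List.foldl_cons, ih, stepA_getD_ne _ _ _ _ h]

lemma foldA_contains (ep : String × List String) (k : String) :
    ∀ (all : List (String × String)) (d : PySem.Dict String (List (String × String))),
      (all.foldl (pvStepA ep) d).contains k = (d.contains k || (k == ep.1 && all.any (pvQ ep))) := by
  intro all
  induction all with
  | nil => intro d; simp
  | cons mk rest ih =>
    intro d
    rw [List.foldl_cons, ih, stepA_contains, List.any_cons]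
    cases hk : (k == ep.1) <;> cases hq : pvQ ep mk <;> cases hd : d.contains k <;> simp
lemma foldA_keys (ep : String × List String) :
    ∀ (all : List (String × String)) (d : PySem.Dict String (List (String × String))),
      (all.foldl (pvStepA ep) d).keys =
        d.keys ++ (if d.contains ep.1 = false ∧ all.any (pvQ ep) = true then [ep.1] else []) := by
  intro all
  induction all with
  | nil => intro d; simp
  | cons mk rest ih =>
    intro d
    rw [List.foldl_cons, ih, stepA_keys, stepA_contains, List.any_cons]
    cases hc : d.contains ep.1 <;> cases hq : pvQ ep mk <;>
      simp [-List.any_eq_true]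
-- ---- A side: outer fold over the expression table ----
lemma foldOuterA (all : List (String × String)) :
    ∀ (exprs : List (String × List String)) (d : PySem.Dict String (List (String × String))),
      (exprs.map (·.1)).Nodup → (∀ ep ∈ exprs, d.contains ep.1 = false) →
      ((exprs.foldl (fun d ep => all.foldl (pvStepA ep) d) d).keys
          = d.keys ++ (exprs.filter (fun ep => all.any (pvQ ep))).map (·.1))
      ∧ (∀ ep ∈ exprs,
          (exprs.foldl (fun d ep => all.foldl (pvStepA ep) d) d).getD ep.1 [] = all.filter (pvQ ep))
      ∧ (∀ k, (∀ ep ∈ exprs, k ≠ ep.1) →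
          (exprs.foldl (fun d ep => all.foldl (pvStepA ep) d) d).getD k [] = d.getD k []) := by
  intro exprs
  induction exprs with
  | nil => intro d _ _; exact ⟨by simp, by simp, fun k _ => rfl⟩
  | cons ep rest ih =>
    intro d hnd hfresh
    have hepd : d.contains ep.1 = false := hfresh ep (show _ ∈ _ :: _ by simp)
    have hnd' : (rest.map (·.1)).Nodup := (List.nodup_cons.mp hnd).2
    have hepnot : ep.1 ∉ rest.map (·.1) := (List.nodup_cons.mp hnd).1
    have hne : ∀ ep' ∈ rest, ep.1 ≠ ep'.1 := by
      intro ep' h' heq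
      exact hepnot (heq ▸ List.mem_map_of_mem h')
    have hfresh' : ∀ ep' ∈ rest, (all.foldl (pvStepA ep) d).contains ep'.1 = false := by
      intro ep' h'
      rw [foldA_contains]
      have : (ep'.1 == ep.1) = false := by
        simp only [beq_eq_false_iff_ne, ne_eq]
        exact fun h => hne ep' h' h.symm
      simp [this, hfresh ep' (List.mem_cons_of_mem _ h')]
    obtain ⟨ihk, ihg, ihu⟩ := ih (all.foldl (pvStepA ep) d) hnd' hfresh'
    refine ⟨?_, ?_, ?_⟩
    · simp only [List.foldl_cons, ihk, foldA_keys, hepd, List.filter_cons]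
      by_cases hq : all.any (pvQ ep) = true <;> simp [hq]
    · intro ep' hmem
      rcases List.mem_cons.mp hmem with h | h
      · rw [h, List.foldl_cons, ihu ep.1 hne, foldA_getD_self,
          PySem.Dict.getD_of_not_contains _ _ hepd]
        simp
      · exact (List.foldl_cons ..) ▸ ihg ep' h
    · intro k hk
      rw [List.foldl_cons, ihu k (fun ep' h' => hk ep' (List.mem_cons_of_mem _ h')),
        foldA_getD_ne ep k (hk ep (show _ ∈ _ :: _ by simp))]

-- ---- list-shape glue ----
lemma nested_foldl_eq {σ : Type} (sk : List (String × List String))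
    (g : σ → (String × String) → σ) :
    ∀ (mp : σ),
      sk.foldl (fun mp p => p.2.foldl (fun mp k => g mp (p.1, k)) mp) mp
        = (sk.flatMap (fun p => p.2.map (fun k => (p.1, k)))).foldl g mp := by
  induction sk with
  | nil => intro mp; rfl
  | cons p rest ih =>
    intro mp
    rw [List.foldl_cons, List.flatMap_cons, List.foldl_append, ih, List.foldl_map]

lemma allkeys_eq (sk : List (String × List String)) :
    sk.foldl (fun acc p => p.2.foldl (fun acc k => acc ++ [(p.1, k)]) acc) []
      = sk.flatMap (fun p => p.2.map (fun k => (p.1, k))) := by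
  have h : ∀ (acc : List (String × String)),
      sk.foldl (fun acc p => p.2.foldl (fun acc k => acc ++ [(p.1, k)]) acc) acc
        = acc ++ sk.flatMap (fun p => p.2.map (fun k => (p.1, k))) := by
    induction sk with
    | nil => intro acc; simp
    | cons p rest ih =>
      intro acc
      rw [List.foldl_cons, PySem.List.foldl_append_singleton_eq_map, List.flatMap_cons, ih,
        List.append_assoc]
  simpa using h []

lemma exprs_names_nodup : (EXPRESSION_PATTERNS.map (·.1)).Nodup := by decide

-- every table pattern is non-empty and already lowercase
lemma table_pats_ok :
    (EXPRESSION_PATTERNS.all (fun ep => ep.2.all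
      (fun p => !p.toList.isEmpty && (PySem.Str.lower p == p)))) = true := by decide

-- A's result in canonical form
lemma A_eq_canon (sk : List (String × List String)) :
    auto_map_expressions sk =
      (EXPRESSION_PATTERNS.filter
          (fun ep => (sk.flatMap (fun p => p.2.map (fun k => (p.1, k)))).any (pvQ ep))).map
        (fun ep => (ep.1, (sk.flatMap (fun p => p.2.map (fun k => (p.1, k)))).filter (pvQ ep))) := by
  unfold auto_map_expressions
  set all := sk.flatMap (fun p => p.2.map (fun k => (p.1, k))) with hall
  rw [allkeys_eq]
  obtain ⟨hkeys, hgetD, _⟩ :=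
    foldOuterA all EXPRESSION_PATTERNS PySem.Dict.empty exprs_names_nodup
      (fun ep _ => PySem.Dict.contains_empty ep.1)
  have hnodup : (EXPRESSION_PATTERNS.foldl (fun d ep => all.foldl (pvStepA ep) d) PySem.Dict.empty).keys.Nodup := by
    rw [hkeys, PySem.Dict.keys_empty, List.nil_append]
    exact List.Nodup.sublist (List.filter_sublist.map _) exprs_names_nodup
  rw [PySem.Dict.items_eq_map_keys _ hnodup [], hkeys, PySem.Dict.keys_empty, List.nil_append,
    List.map_map]
  apply List.map_congr_left
  intro ep hmem
  simp only [Function.comp_apply]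
  rw [hgetD ep (List.mem_of_mem_filter hmem)]

-- ---- B side ----

-- membership in a fold of Set.update
lemma mem_foldl_update {β : Type} (f : β → List String) :
    ∀ (l : List β) (s : PySem.Set String) (y : String),
      y ∈ l.foldl (fun s b => PySem.Set.update s (f b)) s ↔ y ∈ s ∨ ∃ b ∈ l, y ∈ f b := by
  intro l
  induction l with
  | nil => intro s y; simp
  | cons b rest ih =>
    intro s y
    rw [List.foldl_cons, ih, PySem.Set.mem_update]
    constructor
    · rintro ((h | h) | ⟨c, hc, hy⟩)
      · exact Or.inl h
      · exact Or.inr ⟨b, by simp, h⟩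
      · exact Or.inr ⟨c, List.mem_cons_of_mem _ hc, hy⟩
    · rintro (h | ⟨c, hc, hy⟩)
      · exact Or.inl (Or.inl h)
      · rcases List.mem_cons.mp hc with rfl | hc'
        · exact Or.inl (Or.inr hy)
        · exact Or.inr ⟨c, hc', hy⟩

lemma nodup_foldl_update {β : Type} (f : β → List String) :
    ∀ (l : List β) (s : PySem.Set String), s.Nodup →
      (l.foldl (fun s b => PySem.Set.update s (f b)) s).Nodup := by
  intro l
  induction l with
  | nil => intro s h; exact h
  | cons b rest ih =>
    intro s h
    exact ih _ (PySem.Set.nodup_update s (f b) h)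

-- membership in pvMatchedB: some substring of clean hits the index at y
lemma mem_matchedB (clean : String) (y : String) :
    y ∈ pvMatchedB clean ↔
      ∃ i : Int, 0 ≤ i ∧ i < (clean.toList.length : Int) ∧
        ∃ j : Int, i + 1 ≤ j ∧ j < (clean.toList.length : Int) + 1 ∧
          y ∈ PAT2EXPRS.getD (PySem.Str.slice clean (some i) (some j)) [] := by
  have houter : ∀ (l : List Int) (s : PySem.Set String),
      y ∈ l.foldl (fun m i =>
          (PySem.List.pyRange (i + 1) (PySem.Str.len clean + 1) 1).foldl (fun m j =>
            m.update (PAT2EXPRS.getD (PySem.Str.slice clean (some i) (some j)) [])) m) s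
        ↔ y ∈ s ∨ ∃ i ∈ l, ∃ j ∈ PySem.List.pyRange (i + 1) (PySem.Str.len clean + 1) 1,
            y ∈ PAT2EXPRS.getD (PySem.Str.slice clean (some i) (some j)) [] := by
    intro l
    induction l with
    | nil => intro s; simp
    | cons i rest ih =>
      intro s
      rw [List.foldl_cons, ih,
        mem_foldl_update (fun j => PAT2EXPRS.getD (PySem.Str.slice clean (some i) (some j)) [])]
      constructor
      · rintro ((h | ⟨j, hj, hy⟩) | ⟨i', hi', j, hj, hy⟩)
        · exact Or.inl h
        · exact Or.inr ⟨i, by simp, j, hj, hy⟩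
        · exact Or.inr ⟨i', List.mem_cons_of_mem _ hi', j, hj, hy⟩
      · rintro (h | ⟨i', hi', j, hj, hy⟩)
        · exact Or.inl (Or.inl h)
        · rcases List.mem_cons.mp hi' with rfl | hi''
          · exact Or.inl (Or.inr ⟨j, hj, hy⟩)
          · exact Or.inr ⟨i', hi'', j, hj, hy⟩
  unfold pvMatchedB
  rw [houter]
  have hlen : PySem.Str.len clean = (clean.toList.length : Int) := by
    simp [PySem.Str.len]
  simp only [hlen, PySem.Set.empty, List.not_mem_nil, false_or,
    PySem.List.mem_pyRange_one]
  constructor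
  · rintro ⟨i, ⟨h0, hn⟩, j, ⟨h1, h2⟩, hy⟩
    exact ⟨i, h0, hn, j, h1, h2, hy⟩
  · rintro ⟨i, h0, hn, j, h1, h2, hy⟩
    exact ⟨i, ⟨h0, hn⟩, j, ⟨h1, h2⟩, hy⟩

-- the inverted index, characterized
lemma getD_build (tbl : List (String × List String)) :
    ∀ (d : PySem.Dict String (List String)) (p : String),
      (tbl.foldl (fun d ep =>
          ep.2.foldl (fun d q => d.modify q [] (fun v => v ++ [ep.1])) d) d).getD p []
        = d.getD p [] ++
            tbl.flatMap (fun ep => ((ep.2.filter (fun q => q == p)).map (fun _ => ep.1))) := by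
  induction tbl with
  | nil => intro d p; simp
  | cons ep rest ih =>
    intro d p
    rw [List.foldl_cons, ih, List.flatMap_cons, ← List.append_assoc]
    congr 1
    have : ep.2.foldl (fun d q => d.modify q [] (fun v => v ++ [ep.1])) d
        = (ep.2.map (fun q => (q, ep.1))).foldl
            (fun d pr => d.modify pr.1 [] (fun v => v ++ [pr.2])) d := by
      rw [List.foldl_map]
    rw [this, PySem.Dict.getD_foldl_modify_append, List.filter_map, List.map_map]
    congr 1

lemma mem_PAT2EXPRS (e p : String) :
    e ∈ PAT2EXPRS.getD p [] ↔ ∃ ep ∈ EXPRESSION_PATTERNS, ep.1 = e ∧ p ∈ ep.2 := by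
  unfold PAT2EXPRS
  rw [getD_build, PySem.Dict.getD_empty, List.nil_append]
  simp only [List.mem_flatMap, List.mem_map, List.mem_filter, beq_iff_eq]
  constructor
  · rintro ⟨ep, hep, q, ⟨hq, rfl⟩, rfl⟩
    exact ⟨ep, hep, rfl, hq⟩
  · rintro ⟨ep, hep, rfl, hp⟩
    exact ⟨ep, hep, p, ⟨hp, rfl⟩, rfl⟩

-- a non-empty list occurs as some [i:j]-slice iff it is an infix
lemma exists_slice_iff_infix (cs pl : List Char) (hne : pl ≠ []) :
    (∃ i : Int, 0 ≤ i ∧ i < (cs.length : Int) ∧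
        ∃ j : Int, i + 1 ≤ j ∧ j < (cs.length : Int) + 1 ∧
          PySem.List.slice cs (some i) (some j) = pl)
      ↔ pl <:+: cs := by
  constructor
  · rintro ⟨i, h0, hn, j, h1, h2, hs⟩
    have h0j : (0 : Int) ≤ j := by omega
    rw [PySem.List.slice_toNat cs h0 h0j] at hs
    rw [← hs]
    exact ((List.take_prefix _ _).isInfix).trans ((List.drop_suffix _ _).isInfix)
  · rintro ⟨s, t, h⟩
    have hpl : 0 < pl.length := List.length_pos_iff.mpr hne
    refine ⟨(s.length : Int), by positivity, ?_, ((s.length + pl.length : Nat) : Int), ?_, ?_, ?_⟩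
    · have : cs.length = s.length + pl.length + t.length := by
        rw [← h]; simp; omega
      push_cast [this]; omega
    · push_cast; omega
    · have : cs.length = s.length + pl.length + t.length := by
        rw [← h]; simp; omega
      push_cast [this]; omega
    · rw [PySem.List.slice_natCast]
      have hcs : cs = s ++ (pl ++ t) := by rw [← h]; simp
      rw [hcs, List.drop_left]
      have : s.length + pl.length - s.length = pl.length := by omega
      rw [this, List.take_left]

-- the crux: for a table entry ep, ep.1 lands in the matched set iff A's predicate fires
lemma mem_matched_iff_pvQ (ep : String × List String) (hep : ep ∈ EXPRESSION_PATTERNS)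
    (mk : String × String) :
    (ep.1 ∈ pvMatchedB (PySem.Str.strip (PySem.Str.lower mk.2))) ↔ pvQ ep mk = true := by
  set clean := PySem.Str.strip (PySem.Str.lower mk.2) with hclean
  have hok : ∀ ep' ∈ EXPRESSION_PATTERNS, ∀ p ∈ ep'.2,
      p.toList ≠ [] ∧ PySem.Str.lower p = p := by
    intro ep' hep' p hp
    have h1 := List.all_eq_true.mp table_pats_ok ep' hep'
    have h2 := List.all_eq_true.mp h1 p hp
    simp only [Bool.and_eq_true, Bool.not_eq_true', List.isEmpty_eq_false_iff,
      beq_iff_eq] at h2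
    exact ⟨by simpa using h2.1, h2.2⟩
  rw [mem_matchedB]
  have hstep : ∀ p ∈ ep.2,
      (∃ i : Int, 0 ≤ i ∧ i < (clean.toList.length : Int) ∧
        ∃ j : Int, i + 1 ≤ j ∧ j < (clean.toList.length : Int) + 1 ∧
          PySem.Str.slice clean (some i) (some j) = p)
      ↔ p.toList <:+: clean.toList := by
    intro p hp
    rw [← exists_slice_iff_infix clean.toList p.toList (hok ep hep p hp).1]
    constructor
    · rintro ⟨i, h0, hn, j, h1, h2, hs⟩
      refine ⟨i, h0, hn, j, h1, h2, ?_⟩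
      rw [← String.toList_inj] at hs
      simpa using hs
    · rintro ⟨i, h0, hn, j, h1, h2, hs⟩
      refine ⟨i, h0, hn, j, h1, h2, ?_⟩
      rw [← String.toList_inj]
      simpa using hs
  constructor
  · rintro ⟨i, h0, hn, j, h1, h2, hy⟩
    rw [mem_PAT2EXPRS] at hy
    obtain ⟨ep', hep', heq, hpmem⟩ := hy
    have hEq : ep' = ep :=
      List.inj_on_of_nodup_map exprs_names_nodup hep' hep heq
    rw [hEq] at hpmem
    -- the slice is a pattern of ep, hence an infix, hence pvQ fires
    have hinf : (PySem.Str.slice clean (some i) (some j)).toList <:+: clean.toList := by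
      have h0j : (0 : Int) ≤ j := by omega
      have hred : (PySem.Str.slice clean (some i) (some j)).toList
          = PySem.List.slice clean.toList (some i) (some j) := by
        simp [PySem.Str.slice]
      rw [hred, PySem.List.slice_toNat clean.toList h0 h0j]
      exact ((List.take_prefix _ _).isInfix).trans ((List.drop_suffix _ _).isInfix)
    unfold pvQ
    rw [List.any_eq_true]
    refine ⟨_, hpmem, ?_⟩
    rw [(hok ep hep _ hpmem).2, ← hclean]
    have hiS : PySem.Str.isIn (PySem.Str.slice clean (some i) (some j)) clean = true :=
      (PySem.Str.isIn_iff_infix _ _).mpr hinf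
    rw [hiS, Bool.or_true]
  · intro hq
    unfold pvQ at hq
    rw [List.any_eq_true] at hq
    obtain ⟨p, hp, hcond⟩ := hq
    rw [(hok ep hep p hp).2, ← hclean] at hcond
    have hinf : p.toList <:+: clean.toList := by
      rcases Bool.or_eq_true _ _ |>.mp hcond with h | h
      · have : clean = p := by simpa using h
        rw [this]
      · exact (PySem.Str.isIn_iff_infix _ _).mp h
    obtain ⟨i, h0, hn, j, h1, h2, hs⟩ := (hstep p hp).mpr hinf
    refine ⟨i, h0, hn, j, h1, h2, ?_⟩
    rw [mem_PAT2EXPRS, hs]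
    exact ⟨ep, hep, rfl, hp⟩

-- Bool form of the B-side hit predicate
def pvHitB (e : String) (mk : String × String) : Bool :=
  PySem.Set.contains (pvMatchedB (PySem.Str.strip (PySem.Str.lower mk.2))) e

lemma matchedB_nodup (clean : String) : (pvMatchedB clean).Nodup := by
  unfold pvMatchedB
  have h : ∀ (l : List Int) (s : PySem.Set String), s.Nodup →
      (l.foldl (fun m i =>
        (PySem.List.pyRange (i + 1) (PySem.Str.len clean + 1) 1).foldl (fun m j =>
          m.update (PAT2EXPRS.getD (PySem.Str.slice clean (some i) (some j)) [])) m) s).Nodup := by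
    intro l
    induction l with
    | nil => exact fun s h => h
    | cons i rest ih =>
      intro s hs
      exact ih _ (nodup_foldl_update
        (fun j => PAT2EXPRS.getD (PySem.Str.slice clean (some i) (some j)) []) _ _ hs)
  exact h _ _ List.nodup_nil

lemma filter_beq_of_nodup (l : List String) (h : l.Nodup) (x : String) :
    l.filter (fun y => y == x) = if x ∈ l then [x] else [] := by
  induction l with
  | nil => simp
  | cons a rest ih =>
    rw [List.nodup_cons] at h
    rw [List.filter_cons]
    by_cases hax : a = x
    · subst hax
      rw [if_pos (by simp), ih h.2, if_neg h.1, if_pos (by simp)]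
    · rw [if_neg (by simpa using hax), ih h.2]
      by_cases hx : x ∈ rest
      · rw [if_pos hx, if_pos (List.mem_cons_of_mem _ hx)]
      · rw [if_neg hx, if_neg (by simp [hx, Ne.symm hax])]

lemma stepKey_getD (h : PySem.Dict String (List (String × String))) (mesh key x : String) :
    (pvStepKey h mesh key).getD x [] =
      h.getD x [] ++ (if pvHitB x (mesh, key) then [(mesh, key)] else []) := by
  unfold pvStepKey
  have hmap : (pvMatchedB (PySem.Str.strip (PySem.Str.lower key))).foldl
        (fun h e => h.modify e [] (fun v => v ++ [(mesh, key)])) h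
      = ((pvMatchedB (PySem.Str.strip (PySem.Str.lower key))).map
          (fun e => (e, (mesh, key)))).foldl
        (fun h pr => h.modify pr.1 [] (fun v => v ++ [pr.2])) h := by
    rw [List.foldl_map]
  rw [hmap, PySem.Dict.getD_foldl_modify_append, List.filter_map, List.map_map]
  have hcomp : ((fun pr : String × (String × String) => pr.1 == x) ∘ fun e => (e, (mesh, key)))
      = fun e => e == x := rfl
  rw [hcomp, filter_beq_of_nodup _ (matchedB_nodup _) x]
  by_cases hx : x ∈ pvMatchedB (PySem.Str.strip (PySem.Str.lower key))
  · rw [if_pos hx, if_pos (by simpa [pvHitB, PySem.Set.contains_iff] using hx)]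
    simp
  · rw [if_neg hx, if_neg (by simpa [pvHitB, PySem.Set.contains_iff] using hx)]
    simp

lemma matchedB_subset (key : String) :
    ∀ e ∈ pvMatchedB (PySem.Str.strip (PySem.Str.lower key)), e ∈ EXPRESSION_PATTERNS.map (·.1) := by
  intro e he
  rw [mem_matchedB] at he
  obtain ⟨i, _, _, j, _, _, hy⟩ := he
  rw [mem_PAT2EXPRS] at hy
  obtain ⟨ep, hep, rfl, -⟩ := hy
  exact List.mem_map_of_mem hep

lemma stepKey_keys (h : PySem.Dict String (List (String × String))) (mesh key : String)
    (hk : h.keys = EXPRESSION_PATTERNS.map (·.1)) :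
    (pvStepKey h mesh key).keys = h.keys := by
  unfold pvStepKey
  rw [PySem.Dict.keys_foldl_modify, PySem.Set.update_eq_append_filter]
  have hnil : List.filter (fun y => !PySem.Set.contains h.keys y)
      (PySem.Set.ofList (pvMatchedB (PySem.Str.strip (PySem.Str.lower key)))) = [] := by
    rw [List.filter_eq_nil_iff]
    intro e he
    have he' : e ∈ pvMatchedB (PySem.Str.strip (PySem.Str.lower key)) := by
      simpa [PySem.Set.mem_ofList] using he
    have hmem : e ∈ h.keys := by
      rw [hk]; exact matchedB_subset key e he'
    simp [hmem]
  rw [hnil, List.append_nil]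

-- the whole key loop of B
lemma foldB (all : List (String × String)) :
    ∀ (h : PySem.Dict String (List (String × String))),
      h.keys = EXPRESSION_PATTERNS.map (·.1) →
      (all.foldl (fun h mk => pvStepKey h mk.1 mk.2) h).keys = EXPRESSION_PATTERNS.map (·.1)
      ∧ ∀ x, (all.foldl (fun h mk => pvStepKey h mk.1 mk.2) h).getD x []
          = h.getD x [] ++ all.filter (pvHitB x) := by
  induction all with
  | nil => intro h hk; exact ⟨hk, fun x => by simp⟩
  | cons mk rest ih =>
    intro h hk
    have hk' : (pvStepKey h mk.1 mk.2).keys = EXPRESSION_PATTERNS.map (·.1) := by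
      rw [stepKey_keys h mk.1 mk.2 hk, hk]
    obtain ⟨ihk, ihg⟩ := ih (pvStepKey h mk.1 mk.2) hk'
    refine ⟨by rw [List.foldl_cons]; exact ihk, ?_⟩
    intro x
    rw [List.foldl_cons, ihg x, stepKey_getD, List.filter_cons]
    by_cases hx : pvHitB x mk = true
    · rw [if_pos hx, if_pos (by simpa using hx), List.append_assoc]
      rfl
    · rw [if_neg hx, if_neg (by simpa using hx), List.append_nil]

-- initial table-order dict {e: [] for e in EXPRESSION_PATTERNS}
lemma hits0_items :
    (EXPRESSION_PATTERNS.foldl (fun d ep => d.insert ep.1 ([] : List (String × String))) PySem.Dict.empty).items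
      = EXPRESSION_PATTERNS.map (fun ep => (ep.1, ([] : List (String × String)))) := by
  have h := PySem.Dict.items_foldl_insert_fresh (l := EXPRESSION_PATTERNS) (k := (·.1))
    (v := fun _ => ([] : List (String × String))) (d := (PySem.Dict.empty : PySem.Dict String (List (String × String))))
    (fun ep _ => PySem.Dict.contains_empty ep.1) exprs_names_nodup
  simpa using h

lemma hits0_keys :
    (EXPRESSION_PATTERNS.foldl (fun d ep => d.insert ep.1 ([] : List (String × String))) PySem.Dict.empty).keys
      = EXPRESSION_PATTERNS.map (·.1) := by
  simp only [PySem.Dict.keys, hits0_items, List.map_map]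
  rfl

lemma hits0_getD (ep : String × List String) (hep : ep ∈ EXPRESSION_PATTERNS) :
    (EXPRESSION_PATTERNS.foldl (fun d ep => d.insert ep.1 ([] : List (String × String))) PySem.Dict.empty).getD ep.1 [] = [] := by
  apply PySem.Dict.getD_of_mem_items
  · rw [hits0_items]
    exact List.mem_map_of_mem hep
  · rw [hits0_keys]; exact exprs_names_nodup

lemma any_eq_not_isEmpty_filter {α : Type} (l : List α) (q : α → Bool) :
    (!(l.filter q).isEmpty) = l.any q := by
  induction l with
  | nil => simp
  | cons a rest ih =>
    rw [List.filter_cons, List.any_cons]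
    by_cases h : q a = true
    · simp [h]
    · simp only [Bool.not_eq_true] at h
      simp [h, ih]

lemma hitB_eq_pvQ (ep : String × List String) (hep : ep ∈ EXPRESSION_PATTERNS)
    (mk : String × String) : pvHitB ep.1 mk = pvQ ep mk := by
  have h := mem_matched_iff_pvQ ep hep mk
  by_cases hb : pvHitB ep.1 mk = true
  · rw [hb]
    have : ep.1 ∈ pvMatchedB (PySem.Str.strip (PySem.Str.lower mk.2)) := by
      simpa [pvHitB, PySem.Set.contains_iff] using hb
    exact (h.mp this).symm
  · have hb' : pvHitB ep.1 mk = false := by simpa using hb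
    rw [hb']
    by_contra hq
    have hq' : pvQ ep mk = true := by
      cases hqq : pvQ ep mk
      · exact absurd hqq.symm hq
      · rfl
    have := h.mpr hq'
    exact hb (by simpa [pvHitB, PySem.Set.contains_iff] using this)

-- ===== VERDICT (by name: the statement is the Claim_ definition above) =====
theorem auto_map_expressions_spec : Claim_equal_auto_map_expressions := by
  intro sk _
  unfold Spec_auto_map_expressions
  rw [A_eq_canon]
  unfold auto_map_expressions_alt
  have hfold : sk.foldl (fun h p => p.2.foldl (fun h k => pvStepKey h p.1 k) h)
        (EXPRESSION_PATTERNS.foldl (fun d ep => d.insert ep.1 ([] : List (String × String))) PySem.Dict.empty)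
      = (sk.flatMap (fun p => p.2.map (fun k => (p.1, k)))).foldl (fun h mk => pvStepKey h mk.1 mk.2)
        (EXPRESSION_PATTERNS.foldl (fun d ep => d.insert ep.1 ([] : List (String × String))) PySem.Dict.empty) :=
    nested_foldl_eq sk (fun h mk => pvStepKey h mk.1 mk.2) _
  rw [hfold]
  generalize sk.flatMap (fun p => p.2.map (fun k => (p.1, k))) = all
  obtain ⟨hkeys, hgetD⟩ := foldB all _ hits0_keys
  have hnodup : (all.foldl (fun h mk => pvStepKey h mk.1 mk.2)
      (EXPRESSION_PATTERNS.foldl (fun d ep => d.insert ep.1 ([] : List (String × String))) PySem.Dict.empty)).keys.Nodup := by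
    rw [hkeys]; exact exprs_names_nodup
  rw [PySem.Dict.items_eq_map_keys _ hnodup [], hkeys, List.map_map, List.filter_map]
  have hval : ∀ ep ∈ EXPRESSION_PATTERNS,
      (all.foldl (fun h mk => pvStepKey h mk.1 mk.2)
        (EXPRESSION_PATTERNS.foldl (fun d ep => d.insert ep.1 ([] : List (String × String))) PySem.Dict.empty)).getD ep.1 []
        = all.filter (pvQ ep) := by
    intro ep hep
    rw [hgetD ep.1, hits0_getD ep hep, List.nil_append]
    exact List.filter_congr (fun mk _ => hitB_eq_pvQ ep hep mk)
  have hfil : EXPRESSION_PATTERNS.filter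
      ((fun kv : String × List (String × String) => !kv.2.isEmpty) ∘
        ((fun k => (k, (all.foldl (fun h mk => pvStepKey h mk.1 mk.2)
          (EXPRESSION_PATTERNS.foldl (fun d ep => d.insert ep.1 ([] : List (String × String))) PySem.Dict.empty)).getD k [])) ∘ (·.1)))
      = EXPRESSION_PATTERNS.filter (fun ep => all.any (pvQ ep)) := by
    apply List.filter_congr
    intro ep hep
    simp only [Function.comp_apply]
    rw [hval ep hep, any_eq_not_isEmpty_filter]
  rw [hfil]
  symm
  apply List.map_congr_left
  intro ep hep
  simp only [Function.comp_apply]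
  rw [hval ep (List.mem_of_mem_filter hep)]
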